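-- pv_equiv track=rewrite | github.com/Noruzzang/Aiffelthon_qfit | qfit/model_src/qfit_simulation_v1.py | check_3cushion_score
-- ===== SOURCE A (Python) =====
-- def check_3cushion_score(log_list, cue_choice = "white"):
--     if cue_choice == "white":
--         obj_ball = ["R", "Y"]
--     else:
--         obj_ball = ["R", "W"]
--
--     cushion_count = 0
--     hit_set = set()
--     second_ball_hit = False
--
--     for ch in log_list:
--         if ch == "C":
--             cushion_count += 1
--         elif ch in obj_ball:
--             if ch not in hit_set:
--                 hit_set.add(ch)
--                 if len(hit_set) == 2:
--                     # 수정: 3쿠션 충족하지 않으면 득점 불가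
--                     if cushion_count >= 3:
--                         second_ball_hit = True
--                     else:
--                         return False, "3쿠션 미달"
--
--     if second_ball_hit:
--         return True, "정상 득점(3쿠션)"
--     else:
--         if len(hit_set) == 0:
--             return False, "목적구 전혀 못 맞힘"
--         elif len(hit_set) == 1:
--             return False, "목적구 1개만 맞힘"
--         else:
--             return False, "쿠션 3회 미만"
-- ===== SOURCE B (Python) =====
-- def check_3cushion_score(log_list, cue_choice="white"):
--     obj = ("R", "Y") if cue_choice == "white" else ("R", "W")
--     seen = set()
--     idx = None
--     for i, ch in enumerate(log_list):
--         if ch in obj and ch not in seen: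
--             seen.add(ch)
--             if len(seen) == 2:
--                 idx = i
--                 break
--     if idx is None:
--         if len(seen) == 0:
--             return False, "목적구 전혀 못 맞힘"
--         return False, "목적구 1개만 맞힘"
--     if log_list[:idx].count("C") >= 3:
--         return True, "정상 득점(3쿠션)"
--     return False, "3쿠션 미달"
-- ===== Notes on version B (the rewrite author's own statement) =====
-- stated objective: alternative
-- what changed: B splits the job into two phases: an enumerate-and-break scan that only locates the index where the second distinct object ball is hit, then a separate count of 'C' over the prefix log_list[:idx], instead of A's single loop that interleaves cushion counting, set tracking and an early-return flag.
import Mathlib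
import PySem

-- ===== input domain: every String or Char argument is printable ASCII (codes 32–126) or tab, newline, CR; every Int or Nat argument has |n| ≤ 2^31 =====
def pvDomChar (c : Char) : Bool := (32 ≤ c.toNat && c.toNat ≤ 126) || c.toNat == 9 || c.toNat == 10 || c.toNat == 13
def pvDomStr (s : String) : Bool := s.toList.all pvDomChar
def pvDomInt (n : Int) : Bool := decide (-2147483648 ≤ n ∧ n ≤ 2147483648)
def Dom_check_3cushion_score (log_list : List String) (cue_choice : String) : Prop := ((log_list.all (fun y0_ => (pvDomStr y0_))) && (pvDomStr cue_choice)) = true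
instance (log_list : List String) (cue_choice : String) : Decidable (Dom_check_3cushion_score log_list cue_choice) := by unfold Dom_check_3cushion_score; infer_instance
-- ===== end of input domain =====

-- B replaces A's single interleaved loop by a locate-the-scoring-moment scan plus a
-- separate cushion count over the prefix; objective: alternative (same O(n) cost).

-- ===== PORT A =====
-- A's for-loop: state (cushion_count, hit_set, second_ball_hit); .inl = early return.
def pvLoopA (obj : List String) : List String → Int → PySem.Set String → Bool →
    Sum (Bool × String) (PySem.Set String × Bool)
  | [], _, hs, sbh => .inr (hs, sbh)
  | ch :: rest, cc, hs, sbh =>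
    if ch = "C" then pvLoopA obj rest (cc + 1) hs sbh
    else if obj.contains ch then
      if ¬ hs.contains ch then
        let hs' := PySem.Set.add hs ch
        if hs'.length = 2 then
          if cc ≥ 3 then pvLoopA obj rest cc hs' true
          else .inl (false, "3쿠션 미달")
        else pvLoopA obj rest cc hs' sbh
      else pvLoopA obj rest cc hs sbh
    else pvLoopA obj rest cc hs sbh

-- A's code after the loop
def pvPostA (r : Sum (Bool × String) (PySem.Set String × Bool)) : Bool × String :=
  match r with
  | .inl out => out
  | .inr (hs, sbh) =>
    if sbh then (true, "정상 득점(3쿠션)")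
    else if hs.length = 0 then (false, "목적구 전혀 못 맞힘")
    else if hs.length = 1 then (false, "목적구 1개만 맞힘")
    else (false, "쿠션 3회 미만")

def check_3cushion_score (log_list : List String) (cue_choice : String) : Bool × String :=
  pvPostA (pvLoopA (if cue_choice = "white" then ["R", "Y"] else ["R", "W"])
    log_list 0 PySem.Set.empty false)

-- ===== PORT B =====
-- B phase 1: enumerate with break — returns (index of the second distinct object-ball
-- hit if it occurs, the seen-set at loop exit).
def pvFindB (obj : List String) : List String → PySem.Set String → Int →
    Option Int × PySem.Set String
  | [], seen, _ => (none, seen)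
  | ch :: rest, seen, i =>
    if obj.contains ch ∧ ¬ seen.contains ch then
      let seen' := PySem.Set.add seen ch
      if seen'.length = 2 then (some i, seen')
      else pvFindB obj rest seen' (i + 1)
    else pvFindB obj rest seen (i + 1)

def check_3cushion_score_alt (log_list : List String) (cue_choice : String) : Bool × String :=
  match pvFindB (if cue_choice = "white" then ["R", "Y"] else ["R", "W"])
      log_list PySem.Set.empty 0 with
  | (none, seen) =>
    if seen.length = 0 then (false, "목적구 전혀 못 맞힘")
    else (false, "목적구 1개만 맞힘")
  | (some idx, _) =>
    if PySem.List.count (PySem.List.slice log_list none (some idx)) "C" ≥ 3 then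
      (true, "정상 득점(3쿠션)")
    else (false, "3쿠션 미달")

-- ===== PRECONDITION & SPEC =====
def Spec_check_3cushion_score (log_list : List String) (cue_choice : String) (out : Bool × String) : Prop := out = check_3cushion_score_alt log_list cue_choice
instance (log_list : List String) (cue_choice : String) (out : Bool × String) : Decidable (Spec_check_3cushion_score log_list cue_choice out) := by unfold Spec_check_3cushion_score; infer_instance

-- ===== CLAIM (what is proved, stated in full; the proofs are below) =====
def Claim_equal_check_3cushion_score : Prop := ∀ (log_list : List String) (cue_choice : String), Dom_check_3cushion_score log_list cue_choice → Spec_check_3cushion_score log_list cue_choice (check_3cushion_score log_list cue_choice)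

-- ===== LEMMAS AND PROOFS =====

-- bumping pvFindB's running index by one bumps the returned index by one
lemma pvFindB_succ (obj : List String) : ∀ (rest : List String) (seen : PySem.Set String) (i : Int),
    pvFindB obj rest seen (i + 1) =
      ((pvFindB obj rest seen i).1.map (· + 1), (pvFindB obj rest seen i).2) := by
  intro rest
  induction rest with
  | nil => intro seen i; simp [pvFindB]
  | cons ch rest ih =>
    intro seen i
    simp only [pvFindB]
    split_ifs with h1 h2
    · simp
    · exact ih _ (i + 1)
    · exact ih _ (i + 1)

-- pvFindB started at a nonnegative index returns a nonnegative index
lemma pvFindB_nonneg (obj : List String) : ∀ (rest : List String) (seen : PySem.Set String) (i j : Int),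
    0 ≤ i → (pvFindB obj rest seen i).1 = some j → 0 ≤ j := by
  intro rest
  induction rest with
  | nil => intro seen i j _ h; simp [pvFindB] at h
  | cons ch rest ih =>
    intro seen i j hi h
    simp only [pvFindB] at h
    split_ifs at h with h1 h2
    · simp at h; omega
    · exact ih _ (i + 1) j (by omega) h
    · exact ih _ (i + 1) j (by omega) h

-- once both object balls are in hit_set, A's loop never changes state again
lemma pvLoopA_done (obj : List String) (hC : "C" ∉ obj) :
    ∀ (rest : List String) (cc : Int) (hs : PySem.Set String), (∀ x ∈ obj, x ∈ hs) →
      pvLoopA obj rest cc hs true = .inr (hs, true) := by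
  intro rest
  induction rest with
  | nil => intro cc hs _; simp [pvLoopA]
  | cons ch rest ih =>
    intro cc hs hsub
    simp only [pvLoopA]
    by_cases h1 : ch = "C"
    · rw [if_pos h1]; exact ih _ _ hsub
    rw [if_neg h1]
    by_cases h2 : obj.contains ch
    · rw [if_pos h2]
      have hmem : hs.contains ch = true :=
        List.contains_iff_mem.mpr (hsub ch (List.contains_iff_mem.mp h2))
      rw [if_neg (not_not_intro hmem)]
      exact ih _ _ hsub
    · rw [if_neg h2]; exact ih _ _ hsub

-- the central invariant: A's interleaved loop against B's locate-then-count shape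
lemma pvMain (obj : List String) (hC : "C" ∉ obj) (hnd : obj.Nodup) (hlen : obj.length = 2) :
    ∀ (rest : List String) (hs : PySem.Set String) (cc : Int),
      hs.Nodup → (∀ x ∈ hs, x ∈ obj) → hs.length < 2 →
      pvPostA (pvLoopA obj rest cc hs false) =
        (match pvFindB obj rest hs 0 with
         | (none, seen) =>
           if seen.length = 0 then (false, "목적구 전혀 못 맞힘")
           else (false, "목적구 1개만 맞힘")
         | (some i, _) =>
           if cc + (PySem.List.count (rest.take i.toNat) "C" : Int) ≥ 3 then
             (true, "정상 득점(3쿠션)")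
           else (false, "3쿠션 미달")) := by
  intro rest
  induction rest with
  | nil =>
    intro hs cc _ _ hlt
    rcases hs with _ | ⟨a, _ | ⟨b, t⟩⟩
    · simp [pvLoopA, pvFindB, pvPostA]
    · simp [pvLoopA, pvFindB, pvPostA]
    · simp at hlt
  | cons ch rest ih =>
    intro hs cc hndhs hsub hlt
    by_cases hch : ch = "C"
    · -- cushion event: A increments cc, B skips it (since "C" is not an object ball)
      subst hch
      have hcontains : obj.contains "C" = false := by
        rw [Bool.eq_false_iff, ne_eq, List.contains_iff_mem]; exact hC
      simp only [pvLoopA, pvFindB, hcontains, Bool.false_eq_true, false_and, if_false,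
        if_true]
      rw [ih hs (cc + 1) hndhs hsub hlt, pvFindB_succ obj rest hs 0]
      rcases hfind : pvFindB obj rest hs 0 with ⟨o, seen⟩
      rcases o with _ | i
      · simp
      · have hi : 0 ≤ i := pvFindB_nonneg obj rest hs 0 i le_rfl (by rw [hfind])
        have htn : (i + 1).toNat = i.toNat + 1 := by omega
        simp only [Option.map_some, htn, List.take_succ_cons, PySem.List.count_eq,
          List.count_cons_self]
        exact if_congr (by push_cast; omega) rfl rfl
    · have hCne : ("C" : String) ≠ ch := fun h => hch h.symm
      by_cases hin : obj.contains ch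
      · by_cases hseen : hs.contains ch
        · -- already-seen object ball: both sides skip
          simp only [pvLoopA, pvFindB, if_neg hch, if_pos hin, hseen, not_true_eq_false, and_false, if_false]
          rw [ih hs cc hndhs hsub hlt, pvFindB_succ obj rest hs 0]
          rcases hfind : pvFindB obj rest hs 0 with ⟨o, seen⟩
          rcases o with _ | i
          · simp
          · have hi : 0 ≤ i := pvFindB_nonneg obj rest hs 0 i le_rfl (by rw [hfind])
            have htn : (i + 1).toNat = i.toNat + 1 := by omega
            simp only [Option.map_some, htn, List.take_succ_cons, PySem.List.count_eq]
            rw [List.count_cons_of_ne hch]; rfl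
        · -- newly hit object ball
          have hmemobj : ch ∈ obj := List.contains_iff_mem.mp hin
          have hnmem : ch ∉ hs := fun hm => hseen (List.contains_iff_mem.mpr hm)
          have hlen' : (PySem.Set.add hs ch).length = hs.length + 1 := by
            rw [PySem.Set.add_of_not_mem hnmem]; simp
          have hnd' : (PySem.Set.add hs ch).Nodup := PySem.Set.nodup_add hs ch hndhs
          have hsub' : ∀ x ∈ PySem.Set.add hs ch, x ∈ obj := by
            intro x hx
            rcases (PySem.Set.mem_add hs ch x).mp hx with h | h
            · exact hsub x h
            · rw [h]; exact hmemobj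
          simp only [pvLoopA, pvFindB, if_neg hch, if_pos hin,
            if_pos (show ¬ hs.contains ch = true from hseen),
            if_pos (show (obj.contains ch = true) ∧ ¬ hs.contains ch = true from ⟨hin, hseen⟩)]
          by_cases h2 : (PySem.Set.add hs ch).length = 2
          · -- the scoring moment: index 0 within this suffix, empty prefix to count
            have hfull : ∀ x ∈ obj, x ∈ PySem.Set.add hs ch := by
              have hsp : (PySem.Set.add hs ch).Subperm obj := hnd'.subperm hsub'
              have hperm : (PySem.Set.add hs ch).Perm obj :=
                hsp.perm_of_length_le (by omega)
              exact fun x hx => hperm.mem_iff.mpr hx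
            rw [if_pos h2, if_pos h2]
            have h0 : (PySem.List.count (List.take (Int.toNat 0) (ch :: rest)) "C" : Int) = 0 := by
              simp [PySem.List.count_eq]
            by_cases hcc : cc ≥ 3
            · rw [if_pos hcc, pvLoopA_done obj hC rest cc _ hfull]
              simp only [pvPostA, if_true]
              rw [h0, if_pos (show cc + (0:Int) ≥ 3 by omega)]
            · rw [if_neg hcc]
              simp only [pvPostA]
              rw [h0, if_neg (show ¬ cc + (0:Int) ≥ 3 by omega)]
          · -- first distinct object ball: both sides record it and continue
            rw [if_neg h2, if_neg h2]
            rw [ih _ cc hnd' hsub' (by omega), pvFindB_succ obj rest _ 0]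
            rcases hfind : pvFindB obj rest (PySem.Set.add hs ch) 0 with ⟨o, seen⟩
            rcases o with _ | i
            · simp
            · have hi : 0 ≤ i := pvFindB_nonneg obj rest _ 0 i le_rfl (by rw [hfind])
              have htn : (i + 1).toNat = i.toNat + 1 := by omega
              simp only [Option.map_some, htn, List.take_succ_cons, PySem.List.count_eq]
              rw [List.count_cons_of_ne hch]; rfl
      · -- irrelevant event: both sides skip
        simp only [pvLoopA, pvFindB, if_neg hch, if_neg hin,
          if_neg (show ¬ ((obj.contains ch = true) ∧ ¬ hs.contains ch = true) from
            fun h => hin h.1)]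
        rw [ih hs cc hndhs hsub hlt, pvFindB_succ obj rest hs 0]
        rcases hfind : pvFindB obj rest hs 0 with ⟨o, seen⟩
        rcases o with _ | i
        · simp
        · have hi : 0 ≤ i := pvFindB_nonneg obj rest hs 0 i le_rfl (by rw [hfind])
          have htn : (i + 1).toNat = i.toNat + 1 := by omega
          simp only [Option.map_some, htn, List.take_succ_cons, PySem.List.count_eq]
          rw [List.count_cons_of_ne hch]; rfl

-- bridge the generalized invariant (cc = 0, empty set) to B's slice-and-count body
lemma pvTop (obj : List String) (hC : "C" ∉ obj) (hnd : obj.Nodup) (hlen : obj.length = 2)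
    (log : List String) :
    pvPostA (pvLoopA obj log 0 PySem.Set.empty false) =
      (match pvFindB obj log PySem.Set.empty 0 with
       | (none, seen) =>
         if seen.length = 0 then (false, "목적구 전혀 못 맞힘")
         else (false, "목적구 1개만 맞힘")
       | (some idx, _) =>
         if PySem.List.count (PySem.List.slice log none (some idx)) "C" ≥ 3 then
           (true, "정상 득점(3쿠션)")
         else (false, "3쿠션 미달")) := by
  rw [pvMain obj hC hnd hlen log PySem.Set.empty 0 (by simp [PySem.Set.empty])
    (by simp [PySem.Set.empty]) (by simp [PySem.Set.empty])]
  rcases hfind : pvFindB obj log PySem.Set.empty 0 with ⟨o, seen⟩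
  rcases o with _ | i
  · rfl
  · have hi : 0 ≤ i := pvFindB_nonneg obj log PySem.Set.empty 0 i le_rfl (by rw [hfind])
    simp only [PySem.List.slice_to log hi]
    exact if_congr (by omega) rfl rfl

-- ===== VERDICT (by name: the statement is the Claim_ definition above) =====
theorem check_3cushion_score_spec : Claim_equal_check_3cushion_score := by
  intro log_list cue_choice _
  unfold Spec_check_3cushion_score check_3cushion_score check_3cushion_score_alt
  by_cases hcue : cue_choice = "white"
  · rw [if_pos hcue]
    exact pvTop _ (by decide) (by decide) rfl log_list
  · rw [if_neg hcue]
    exact pvTop _ (by decide) (by decide) rfl log_list
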